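-- pv_equiv track=rewrite | github.com/polyfem/polyfem-data | old-tolerances/multi-material/msh_test/gen_test_meshes.py | split_cells_by_tags
-- ===== SOURCE A (Python) =====
-- def split_cells_by_tags(tags, cells):
--     assert(len(tags) == len(cells))
--     split_cells = [[cells[0]]]
--     for i, tag in enumerate(tags[1:]):
--         if tag == tags[i]:
--             split_cells[-1].append(cells[i + 1])
--         else:
--             split_cells.append([cells[i + 1]])
--     return split_cells
-- ===== SOURCE B (Python) =====
-- def _run_lengths(tags):
--     # length of each maximal run of equal adjacent tags, one run per outer step
--     lengths = []
--     i = 0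
--     while i < len(tags):
--         j = i + 1
--         while j < len(tags) and tags[j] == tags[i]:
--             j += 1
--         lengths.append(j - i)
--         i = j
--     return lengths
--
--
-- def split_cells_by_tags(tags, cells):
--     assert(len(tags) == len(cells))
--     out = []
--     pos = 0
--     for L in _run_lengths(tags):
--         out.append(cells[pos:pos + L])
--         pos += L
--     return out
-- ===== Notes on version B (the rewrite author's own statement) =====
-- stated objective: alternative
-- what changed: B first run-length-encodes the tag list by recursion on maximal runs and then slices cells at the cumulative run lengths, instead of A's element-wise index loop that appends each cell into the last bucket.
import Mathlib
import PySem

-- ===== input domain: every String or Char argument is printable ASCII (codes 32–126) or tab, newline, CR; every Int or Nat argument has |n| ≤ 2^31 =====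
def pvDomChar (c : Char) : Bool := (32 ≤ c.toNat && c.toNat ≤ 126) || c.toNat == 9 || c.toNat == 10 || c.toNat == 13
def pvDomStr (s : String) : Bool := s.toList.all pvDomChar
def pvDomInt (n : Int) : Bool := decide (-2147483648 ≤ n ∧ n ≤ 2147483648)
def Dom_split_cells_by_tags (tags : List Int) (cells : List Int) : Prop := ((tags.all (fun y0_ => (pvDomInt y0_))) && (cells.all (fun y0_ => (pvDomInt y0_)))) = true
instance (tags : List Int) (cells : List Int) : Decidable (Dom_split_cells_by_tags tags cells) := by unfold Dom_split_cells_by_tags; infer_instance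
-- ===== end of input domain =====

-- B replaces A's element-wise last-bucket loop by run-length-encoding the tags and slicing
-- cells at the cumulative run lengths (alternative decomposition, same cost).


-- ===== PORT A =====
-- split_cells[-1].append(x): append x to the last inner list (Pre_ guarantees nonempty state)
def pyAppendLast (sc : List (List Int)) (x : Int) : List (List Int) :=
  match sc with
  | [] => []
  | [r] => [r ++ [x]]
  | r :: rs => r :: pyAppendLast rs x

-- the loop body of A: 'if tag == tags[i]: split_cells[-1].append(cells[i+1]) else: split_cells.append([cells[i+1]])'
-- (pyGet? …).getD 0 is exact here: Pre_ keeps every index in range, so pyGet? never returns none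
def loopA (tags cells : List Int) (sc : List (List Int)) (it : Int × Int) : List (List Int) :=
  if it.2 = (PySem.List.pyGet? tags it.1).getD 0 then
    pyAppendLast sc ((PySem.List.pyGet? cells (it.1 + 1)).getD 0)
  else
    sc ++ [[(PySem.List.pyGet? cells (it.1 + 1)).getD 0]]

def split_cells_by_tags (tags : List Int) (cells : List Int) : List (List Int) :=
  -- the assert; on unequal lengths Python raises (outside Pre_)
  if tags.length = cells.length then
    (PySem.List.enumerate (PySem.List.slice tags (some 1) none) 0).foldl
      (loopA tags cells)
      [[(PySem.List.pyGet? cells 0).getD 0]]   -- cells[0]; raises on empty input (outside Pre_)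
  else []

-- ===== PORT B =====
-- the while loop of _run_lengths: how many leading elements of ts equal t (so n = countRun + 1)
def countRun (t : Int) : List Int → Nat
  | [] => 0
  | c :: cs => if c = t then countRun t cs + 1 else 0

def runLengths : List Int → List Nat
  | [] => []
  | t :: ts => (countRun t ts + 1) :: runLengths (ts.drop (countRun t ts))
termination_by l => l.length
decreasing_by simp [List.length_drop]

-- the loop body of B: 'out.append(cells[pos:pos+L]); pos += L'
def loopB (cells : List Int) (st : List (List Int) × Nat) (L : Nat) : List (List Int) × Nat :=
  (st.1 ++ [PySem.List.slice cells (some (st.2 : Int)) (some ((st.2 : Int) + (L : Int)))], st.2 + L)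

def split_cells_by_tags_alt (tags : List Int) (cells : List Int) : List (List Int) :=
  if tags.length = cells.length then
    ((runLengths tags).foldl (loopB cells) ([], 0)).1
  else []

-- ===== PRECONDITION & SPEC =====
-- Pre_ excludes exactly the inputs on which A raises: unequal lengths (AssertionError) and empty tags (IndexError at cells[0])
def Pre_split_cells_by_tags (tags : List Int) (cells : List Int) : Prop :=
  tags.length = cells.length ∧ tags ≠ []
instance (tags : List Int) (cells : List Int) : Decidable (Pre_split_cells_by_tags tags cells) := by unfold Pre_split_cells_by_tags; infer_instance

def pvWitness_split_cells_by_tags : List Int × List Int := ([1, 1, 2], [10, 11, 12])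

def Spec_split_cells_by_tags (tags : List Int) (cells : List Int) (out : List (List Int)) : Prop := out = split_cells_by_tags_alt tags cells
instance (tags : List Int) (cells : List Int) (out : List (List Int)) : Decidable (Spec_split_cells_by_tags tags cells out) := by unfold Spec_split_cells_by_tags; infer_instance

-- ===== CLAIM (what is proved, stated in full; the proofs are below) =====
def Claim_equal_split_cells_by_tags : Prop := ∀ (tags : List Int) (cells : List Int), Dom_split_cells_by_tags tags cells → Pre_split_cells_by_tags tags cells → Spec_split_cells_by_tags tags cells (split_cells_by_tags tags cells)

-- ===== LEMMAS AND PROOFS =====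

-- reference grouping: gr t cur ts cs = the runs of cells, with cur the run in progress whose last tag is t
def gr (t : Int) (cur : List Int) : List Int → List Int → List (List Int)
  | [], _ => [cur]
  | _ :: _, [] => [cur]
  | t' :: ts, c :: cs => if t' = t then gr t' (cur ++ [c]) ts cs else cur :: gr t' [c] ts cs

def grTail : List Int → List Int → List (List Int)
  | t' :: ts', c' :: cs' => gr t' [c'] ts' cs'
  | _, _ => []

lemma runLengths_nil : runLengths [] = [] := by simp [runLengths]

lemma runLengths_cons (t : Int) (ts : List Int) :
    runLengths (t :: ts) = (countRun t ts + 1) :: runLengths (ts.drop (countRun t ts)) := by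
  simp [runLengths]

lemma countRun_le (t : Int) (ts : List Int) : countRun t ts ≤ ts.length := by
  induction ts with
  | nil => simp [countRun]
  | cons a l ih => by_cases h : a = t <;> simp [countRun, h]; omega

lemma pyAppendLast_append (done : List (List Int)) (cur : List Int) (x : Int) :
    pyAppendLast (done ++ [cur]) x = done ++ [cur ++ [x]] := by
  induction done with
  | nil => rfl
  | cons d ds ih =>
      cases ds with
      | nil => rfl
      | cons e es =>
          simp only [List.cons_append] at ih ⊢
          change d :: pyAppendLast (e :: (es ++ [cur])) x = d :: (e :: (es ++ [cur ++ [x]]))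
          rw [ih]

lemma foldA_gen (tags cells : List Int) :
    ∀ (rest_t rest_c : List Int) (j : Nat) (t : Int) (done : List (List Int)) (cur : List Int),
    tags.drop (j + 1) = rest_t → cells.drop (j + 1) = rest_c →
    tags.length = cells.length → tags[j]? = some t →
    (PySem.List.enumerate rest_t (j : Int)).foldl (loopA tags cells) (done ++ [cur])
      = done ++ gr t cur rest_t rest_c := by
  intro rest_t
  induction rest_t with
  | nil =>
      intro rest_c j t done cur _ _ _ _
      cases rest_c <;> simp [PySem.List.enumerate_nil, gr]
  | cons t' ts' ih =>
      intro rest_c j t done cur ht hc hlen hprev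
      cases rest_c with
      | nil =>
          exfalso
          have h1 : (tags.drop (j+1)).length = (cells.drop (j+1)).length := by
            simp [List.length_drop, hlen]
          rw [ht, hc] at h1; simp at h1
      | cons c' cs' =>
          have ht' : tags[j+1]? = some t' := by
            have := congrArg (·[0]?) ht
            simpa [List.getElem?_drop] using this
          have hc' : cells[j+1]? = some c' := by
            have := congrArg (·[0]?) hc
            simpa [List.getElem?_drop] using this
          rw [PySem.List.enumerate_cons, List.foldl_cons]
          have hdt : tags.drop (j + 1 + 1) = ts' := by
            rw [← List.drop_drop, ht]; rfl
          have hdc : cells.drop (j + 1 + 1) = cs' := by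
            rw [← List.drop_drop, hc]; rfl
          have hcast : ((j : Nat) : Int) + 1 = ((j + 1 : Nat) : Int) := by push_cast; ring
          have hgt : (PySem.List.pyGet? tags ((j : Nat) : Int)).getD 0 = t := by
            rw [PySem.List.pyGet?_natCast, hprev]; rfl
          have hgc : (PySem.List.pyGet? cells (((j : Nat) : Int) + 1)).getD 0 = c' := by
            rw [hcast, PySem.List.pyGet?_natCast, hc']; rfl
          by_cases heq : t' = t
          · rw [show loopA tags cells (done ++ [cur]) ((j : Int), t') = done ++ [cur ++ [c']] by
                simp only [loopA, hgt, hgc]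
                rw [if_pos heq, pyAppendLast_append]]
            rw [hcast, ih cs' (j+1) t' done (cur ++ [c']) hdt hdc hlen ht']
            simp [gr, heq]
          · rw [show loopA tags cells (done ++ [cur]) ((j : Int), t')
                  = (done ++ [cur]) ++ [[c']] by
                simp only [loopA, hgt, hgc]
                rw [if_neg heq]]
            rw [hcast, ih cs' (j+1) t' (done ++ [cur]) [c'] hdt hdc hlen ht']
            simp [gr, heq]

lemma gr_run (ts : List Int) : ∀ (cs : List Int) (t : Int) (cur : List Int),
    ts.length = cs.length →
    gr t cur ts cs = (cur ++ cs.take (countRun t ts)) ::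
      grTail (ts.drop (countRun t ts)) (cs.drop (countRun t ts)) := by
  induction ts with
  | nil =>
      intro cs t cur hlen
      have : cs = [] := by cases cs <;> simp_all
      subst this; simp [gr, countRun, grTail]
  | cons t' ts' ih =>
      intro cs t cur hlen
      cases cs with
      | nil => simp at hlen
      | cons c' cs' =>
          by_cases heq : t' = t
          · subst heq
            have hlen' : ts'.length = cs'.length := by simpa using hlen
            simp only [gr, countRun, if_pos rfl]
            rw [ih cs' t' (cur ++ [c']) hlen']
            simp [List.take_succ_cons, List.drop_succ_cons]
          · simp [gr, heq, countRun, grTail]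

lemma foldB_gen (cells : List Int) :
    ∀ (n : Nat) (ts : List Int), ts.length = n →
    ∀ (cs : List Int) (t c : Int) (pos : Nat) (out : List (List Int)),
    cells.drop pos = c :: cs →
    ts.length = cs.length →
    ((runLengths (t :: ts)).foldl (loopB cells) (out, pos)).1 = out ++ gr t [c] ts cs := by
  intro n
  induction n using Nat.strong_induction_on with
  | _ n ihn =>
    intro ts hn cs t c pos out hd hlen
    have hkle := countRun_le t ts
    have hgr := gr_run ts cs t [c] hlen
    have hrl := runLengths_cons t ts
    generalize hk : countRun t ts = k at hkle hgr hrl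
    rw [hrl, List.foldl_cons]
    have hslice : PySem.List.slice cells (some (pos : Int)) (some ((pos : Int) + ((k : Int) + 1)))
        = c :: cs.take k := by
      have h := PySem.List.slice_natCast_add cells pos (k + 1)
      push_cast at h
      rw [h, hd]
      simp [List.take_succ_cons]
    have hstep : loopB cells (out, pos) (k + 1) = (out ++ [c :: cs.take k], pos + (k + 1)) := by
      simp only [loopB]
      push_cast
      rw [hslice]
    rw [hstep]
    have hdropcs : cells.drop (pos + (k + 1)) = cs.drop k := by
      rw [← List.drop_drop, hd, List.drop_succ_cons]
    rcases Nat.lt_or_ge k ts.length with hlt | hge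
    · -- the run does not consume all of ts
      obtain ⟨t', ts'', hts⟩ : ∃ t' ts'', ts.drop k = t' :: ts'' := by
        cases h : ts.drop k with
        | nil =>
            exfalso
            have h2 := List.length_drop (l := ts) (i := k)
            rw [h] at h2; simp at h2; omega
        | cons a l => exact ⟨a, l, rfl⟩
      obtain ⟨c', cs'', hcs⟩ : ∃ c' cs'', cs.drop k = c' :: cs'' := by
        cases h : cs.drop k with
        | nil =>
            exfalso
            have h2 := List.length_drop (l := cs) (i := k)
            rw [h] at h2; simp at h2; omega
        | cons a l => exact ⟨a, l, rfl⟩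
      have hlen'' : ts''.length = cs''.length := by
        have h1 := List.length_drop (l := ts) (i := k)
        have h2 := List.length_drop (l := cs) (i := k)
        rw [hts] at h1; rw [hcs] at h2; simp at h1 h2; omega
      have hdnext : cells.drop (pos + (k + 1)) = c' :: cs'' := by rw [hdropcs, hcs]
      rw [hts]
      rw [ihn ts''.length (by
            have h1 := List.length_drop (l := ts) (i := k)
            rw [hts] at h1; simp at h1; omega)
          ts'' rfl cs'' t' c' (pos + (k + 1)) (out ++ [c :: cs.take k]) hdnext hlen'']
      rw [hgr, hts, hcs]
      simp [grTail]
    · -- the run consumes all of ts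
      have hkeq : k = ts.length := le_antisymm hkle hge
      have hts : ts.drop k = [] := by rw [hkeq]; simp
      rw [hts, runLengths_nil, List.foldl_nil, hgr, hts]
      have hcs : cs.drop k = [] := List.drop_eq_nil_of_le (by omega)
      have htake : cs.take k = cs := List.take_of_length_le (by omega)
      rw [hcs, htake]
      simp [grTail]

-- ===== VERDICT (by name: the statement is the Claim_ definition above) =====
theorem split_cells_by_tags_spec : Claim_equal_split_cells_by_tags := by
  intro tags cells _ hpre
  obtain ⟨hlen, hne⟩ := hpre
  unfold Spec_split_cells_by_tags
  cases tags with
  | nil => exact absurd rfl hne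
  | cons t ts =>
      cases cells with
      | nil => simp at hlen
      | cons c cs =>
          have hlen' : ts.length = cs.length := by simpa using hlen
          unfold split_cells_by_tags split_cells_by_tags_alt
          rw [if_pos hlen, if_pos hlen]
          have hA : (PySem.List.enumerate (PySem.List.slice (t :: ts) (some 1) none) 0).foldl
              (loopA (t :: ts) (c :: cs)) [[(PySem.List.pyGet? (c :: cs) 0).getD 0]]
              = gr t [c] ts cs := by
            have h1 : PySem.List.slice (t :: ts) (some 1) none = ts := by
              rw [PySem.List.slice_from_one]; rfl
            have h2 : (PySem.List.pyGet? (c :: cs) 0).getD 0 = c := by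
              simp
            rw [h1, h2]
            have := foldA_gen (t :: ts) (c :: cs) ts cs 0 t [] [c] (by simp) (by simp) hlen (by simp)
            simpa using this
          have hB : ((runLengths (t :: ts)).foldl (loopB (c :: cs)) ([], 0)).1 = gr t [c] ts cs := by
            have := foldB_gen (c :: cs) ts.length ts rfl cs t c 0 [] (by simp) hlen'
            simpa using this
          rw [hA, hB]
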